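-- pv_equiv track=rewrite | github.com/andrasfe/war_rig | war_rig/skills/datacard_skill.py | _clean_datacards_content
-- ===== SOURCE A (Python) =====
-- def _clean_datacards_content(content: str) -> str:
--     """Clean up the datacards content for inclusion.
--
--     Removes the main header and metadata lines.
--
--     Args:
--         content: Raw datacards content.
--
--     Returns:
--         Cleaned content string.
--     """
--     lines = content.strip().split("\n")
--     cleaned_lines: list[str] = []
--     skip_header = True
--
--     for line in lines:
--         stripped = line.strip()
--
--         # Skip the main header (we provide our own)
--         if skip_header and stripped.startswith("# "):
--             skip_header = False
--             continue
--
--         # Skip generated timestamp lines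
--         if stripped.startswith("*Generated:") and stripped.endswith("*"):
--             continue
--
--         cleaned_lines.append(line)
--
--     return "\n".join(cleaned_lines).strip()
-- ===== SOURCE B (Python) =====
-- def _clean_datacards_content(content: str) -> str:
--     """Clean up the datacards content: drop the first '# ' header line and
--     all '*Generated:...*' timestamp lines."""
--     lines = content.strip().split("\n")
--     header_idx = next(
--         (i for i, l in enumerate(lines) if l.strip().startswith("# ")), None
--     )
--     kept = [
--         line
--         for i, line in enumerate(lines)
--         if i != header_idx
--         and not (line.strip().startswith("*Generated:") and line.strip().endswith("*"))
--     ]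
--     return "\n".join(kept).strip()
-- ===== Notes on version B (the rewrite author's own statement) =====
-- stated objective: alternative
-- what changed: Replaced the stateful single pass with a skip_header flag by a stateless two-phase decomposition: first locate the index of the first markdown header line, then keep lines by an index/content filter.
import Mathlib
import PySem

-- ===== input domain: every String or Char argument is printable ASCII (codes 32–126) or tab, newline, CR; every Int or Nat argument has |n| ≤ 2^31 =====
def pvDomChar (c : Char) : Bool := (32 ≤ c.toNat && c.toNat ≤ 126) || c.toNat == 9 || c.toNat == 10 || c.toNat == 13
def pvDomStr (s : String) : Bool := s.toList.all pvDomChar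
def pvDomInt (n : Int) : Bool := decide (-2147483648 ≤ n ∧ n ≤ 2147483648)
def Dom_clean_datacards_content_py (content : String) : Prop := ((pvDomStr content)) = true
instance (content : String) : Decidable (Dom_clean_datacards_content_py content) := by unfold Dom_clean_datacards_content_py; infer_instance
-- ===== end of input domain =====

-- B replaces A's stateful skip_header single pass by a stateless two-phase decomposition
-- (find the first '# ' header line's index, then filter by index/content); same cost.

-- ===== PORT A =====
-- the for-loop of A, carrying (cleaned_lines, skip_header) as state
def cleanLoopA : List (List Char) → List (List Char) → Bool → List (List Char)
  | [], acc, _ => acc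
  | line :: rest, acc, skip =>
    let stripped := PySem.Chars.strip line
    if skip && PySem.Chars.startswith stripped ['#', ' '] then
      cleanLoopA rest acc false
    else if PySem.Chars.startswith stripped "*Generated:".toList &&
            PySem.Chars.endswith stripped ['*'] then
      cleanLoopA rest acc skip
    else
      cleanLoopA rest (acc ++ [line]) skip

def clean_datacards_content_py (content : String) : String :=
  let lines := PySem.Chars.splitOn (PySem.Chars.strip content.toList) ['\n']
  String.ofList (PySem.Chars.strip (PySem.Chars.join ['\n'] (cleanLoopA lines [] true)))

-- ===== PORT B =====
def clean_datacards_content_py_alt (content : String) : String :=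
  let lines := PySem.Chars.splitOn (PySem.Chars.strip content.toList) ['\n']
  let headerIdx : Option Int :=
    ((PySem.List.enumerate lines).find?
      (fun q => PySem.Chars.startswith (PySem.Chars.strip q.2) ['#', ' '])).map (·.1)
  let kept :=
    ((PySem.List.enumerate lines).filter (fun p =>
      (some p.1 != headerIdx) &&
      !(PySem.Chars.startswith (PySem.Chars.strip p.2) "*Generated:".toList &&
        PySem.Chars.endswith (PySem.Chars.strip p.2) ['*']))).map (·.2)
  String.ofList (PySem.Chars.strip (PySem.Chars.join ['\n'] kept))

-- ===== PRECONDITION & SPEC =====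
def Spec_clean_datacards_content_py (content : String) (out : String) : Prop := out = clean_datacards_content_py_alt content
instance (content : String) (out : String) : Decidable (Spec_clean_datacards_content_py content out) := by unfold Spec_clean_datacards_content_py; infer_instance

-- ===== CLAIM (what is proved, stated in full; the proofs are below) =====
def Claim_equal_clean_datacards_content_py : Prop := ∀ (content : String), Dom_clean_datacards_content_py content → Spec_clean_datacards_content_py content (clean_datacards_content_py content)

-- ===== LEMMAS AND PROOFS =====

-- remove the first element satisfying h
def remFirstP (h : List Char → Bool) : List (List Char) → List (List Char)
  | [] => []
  | l :: ls => if h l then ls else l :: remFirstP h ls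

def hdrP (l : List Char) : Bool := PySem.Chars.startswith (PySem.Chars.strip l) ['#', ' ']
def genP (l : List Char) : Bool :=
  PySem.Chars.startswith (PySem.Chars.strip l) "*Generated:".toList &&
  PySem.Chars.endswith (PySem.Chars.strip l) ['*']

theorem notGen_of_not (l : List Char)
    (h2 : ¬(PySem.Chars.startswith (PySem.Chars.strip l) "*Generated:".toList &&
            PySem.Chars.endswith (PySem.Chars.strip l) ['*']) = true) :
    (!genP l) = true := by
  simp only [genP, Bool.not_eq_true']
  exact Bool.eq_false_iff.mpr h2

theorem gen_of (l : List Char)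
    (h2 : (PySem.Chars.startswith (PySem.Chars.strip l) "*Generated:".toList &&
           PySem.Chars.endswith (PySem.Chars.strip l) ['*']) = true) :
    ¬(!genP l) = true := by
  simp only [genP, Bool.not_eq_true']
  simp at h2
  simp [h2.1, h2.2]

theorem loopA_false (ls : List (List Char)) : ∀ acc,
    cleanLoopA ls acc false = acc ++ ls.filter (fun l => !genP l) := by
  induction ls with
  | nil => intro acc; simp [cleanLoopA]
  | cons l ls ih =>
    intro acc
    simp only [cleanLoopA]
    split_ifs with h1 h2
    · exact absurd h1 (by simp)
    · rw [ih, List.filter_cons, if_neg (gen_of l h2)]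
    · rw [ih, List.filter_cons, if_pos (notGen_of_not l h2)]
      simp

theorem loopA_true (ls : List (List Char)) : ∀ acc,
    cleanLoopA ls acc true = acc ++ (remFirstP hdrP ls).filter (fun l => !genP l) := by
  induction ls with
  | nil => intro acc; simp [cleanLoopA, remFirstP]
  | cons l ls ih =>
    intro acc
    simp only [cleanLoopA]
    split_ifs with h1 h2
    · rw [loopA_false, remFirstP, if_pos (by simp only [hdrP]; simpa using h1)]
    · rw [ih, remFirstP, if_neg (by simp only [hdrP]; simpa using h1),
        List.filter_cons, if_neg (gen_of l h2)]
    · rw [ih, remFirstP, if_neg (by simp only [hdrP]; simpa using h1),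
        List.filter_cons, if_pos (notGen_of_not l h2)]
      simp

-- filtering on the line only, then projecting, forgets the indices
theorem filter_enum_snd (ls : List (List Char)) : ∀ (t : Int),
    ((PySem.List.enumerate ls t).filter (fun p => !genP p.2)).map (·.2)
      = ls.filter (fun l => !genP l) := by
  induction ls with
  | nil => intro t; simp [PySem.List.enumerate_nil]
  | cons l ls ih =>
    intro t
    by_cases hg : genP l = true
    · simp [PySem.List.enumerate_cons, hg, ih]
    · simp [PySem.List.enumerate_cons, hg, ih]

theorem enum_fst_ge (ls : List (List Char)) (s : Int) (p : Int × List Char)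
    (hp : p ∈ PySem.List.enumerate ls s) : s ≤ p.1 := by
  rcases (PySem.List.mem_enumerate_iff ls s p).1 hp with ⟨k, hk, rfl⟩
  simp

theorem kept_eq (ls : List (List Char)) : ∀ (s : Int),
    ((PySem.List.enumerate ls s).filter (fun p =>
        (some p.1 != ((PySem.List.enumerate ls s).find? (fun q => hdrP q.2)).map (·.1)) &&
        !genP p.2)).map (·.2)
      = (remFirstP hdrP ls).filter (fun l => !genP l) := by
  induction ls with
  | nil => intro s; simp [PySem.List.enumerate_nil, remFirstP]
  | cons l ls ih =>
    intro s
    rw [PySem.List.enumerate_cons]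
    by_cases hh : hdrP l = true
    · -- header found at index s: drop it; every later index differs from s
      rw [List.find?_cons_of_pos (by simpa using hh)]
      have hcong : ∀ p ∈ PySem.List.enumerate ls (s + 1),
          ((some p.1 != (some (s, l)).map (·.1)) && !genP p.2) = !genP p.2 := by
        intro p hp
        have := enum_fst_ge ls (s + 1) p hp
        have hne : p.1 ≠ s := by omega
        simp [hne]
      rw [List.filter_cons, if_neg (by simp), List.filter_congr hcong, filter_enum_snd _,
        remFirstP, if_pos hh]
    · -- head is not the header: its index differs from any found index further on
      rw [List.find?_cons_of_neg (by simpa using hh)]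
      have hne : (some s !=
          ((PySem.List.enumerate ls (s + 1)).find? (fun q => hdrP q.2)).map (·.1)) = true := by
        cases hfind : (PySem.List.enumerate ls (s + 1)).find? (fun q => hdrP q.2) with
        | none => simp
        | some q =>
          have hmem := List.mem_of_find?_eq_some hfind
          have := enum_fst_ge ls (s + 1) q hmem
          simp; omega
      rw [remFirstP, if_neg (by simp [hh]), List.filter_cons]
      by_cases hg : genP l = true
      · rw [List.filter_cons, if_neg (by simp [hg]), if_neg (by simp [hg]), ih]
      · rw [List.filter_cons, if_pos (by simp [hne, hg]), if_pos (by simp [hg]),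
          List.map_cons, ih]

-- ===== VERDICT (by name: the statement is the Claim_ definition above) =====
theorem clean_datacards_content_py_spec : Claim_equal_clean_datacards_content_py := by
  intro content _
  unfold Spec_clean_datacards_content_py clean_datacards_content_py clean_datacards_content_py_alt
  simp only []
  have hk := kept_eq (PySem.Chars.splitOn (PySem.Chars.strip content.toList) ['\n']) 0
  simp only [hdrP, genP] at hk
  rw [loopA_true _ [], hk]
  simp [genP]
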